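-- pv_equiv track=rewrite | github.com/omnislash157/cog_twin | scripts/migrate_to_unified.py | deduplicate_episodes
-- ===== SOURCE A (Python) =====
-- from typing import Dict, List, Set, Tuple, Optional, Any
--
-- def deduplicate_episodes(episodes: List[Dict]) -> Tuple[List[Dict], int]:
--     """Deduplicate episodes by ID."""
--     seen_ids: Set[str] = set()
--     unique_episodes = []
--     duplicates = 0
--
--     for ep in episodes:
--         ep_id = ep.get('id', '')
--         if ep_id and ep_id in seen_ids:
--             duplicates += 1
--             continue
--
--         if ep_id:
--             seen_ids.add(ep_id)
--         unique_episodes.append(ep)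
--
--     return unique_episodes, duplicates
-- ===== SOURCE B (Python) =====
-- def _ep_id(ep):
--     return ep.get('id', '')
--
-- def deduplicate_episodes(episodes):
--     # First pass: index of the first occurrence of each id (including '').
--     first = {}
--     for i, ep in enumerate(episodes):
--         first.setdefault(_ep_id(ep), i)
--     # Second pass: keep an episode iff its id is empty or this is its first occurrence.
--     unique_episodes = [ep for i, ep in enumerate(episodes)
--                        if not _ep_id(ep) or first[_ep_id(ep)] == i]
--     return unique_episodes, len(episodes) - len(unique_episodes)
-- ===== Notes on version B (the rewrite author's own statement) =====
-- stated objective: alternative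
-- what changed: B drops A's streaming seen-set/duplicate-counter accumulator: it builds a first-occurrence-index dict in one pass, then keeps an episode iff its id is empty or its index equals that first occurrence, computing duplicates as len(episodes) - len(unique_episodes).
import Mathlib
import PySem

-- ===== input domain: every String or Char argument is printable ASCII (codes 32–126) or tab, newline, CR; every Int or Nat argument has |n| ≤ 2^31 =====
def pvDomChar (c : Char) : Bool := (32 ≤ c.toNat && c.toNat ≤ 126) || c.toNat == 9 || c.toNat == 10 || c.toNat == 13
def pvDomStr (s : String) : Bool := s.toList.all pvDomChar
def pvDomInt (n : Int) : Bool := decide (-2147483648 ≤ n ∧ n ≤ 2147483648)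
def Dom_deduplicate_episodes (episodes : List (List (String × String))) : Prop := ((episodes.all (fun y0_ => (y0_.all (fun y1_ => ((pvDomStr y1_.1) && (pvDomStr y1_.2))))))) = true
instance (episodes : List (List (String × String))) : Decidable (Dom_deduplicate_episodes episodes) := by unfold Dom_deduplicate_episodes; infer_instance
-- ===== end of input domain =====

-- B replaces A's streaming seen-set + duplicate-counter accumulator by a two-pass scheme
-- (first-occurrence-index dict, then an indexed filter; duplicates = len(episodes) - len(unique)).

-- ===== PORT A =====
-- the for-loop of A with its three accumulators (seen_ids, unique_episodes, duplicates)
def dedupLoopA : List (List (String × String)) → PySem.Set String → List (List (String × String)) → Int → (List (List (String × String))) × Int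
  | [], _, unique, dups => (unique, dups)
  | ep :: rest, seen, unique, dups =>
    let epId := (PySem.Dict.mk ep).getD "id" ""
    if epId ≠ "" ∧ PySem.Set.contains seen epId = true then
      dedupLoopA rest seen unique (dups + 1)
    else
      dedupLoopA rest (if epId ≠ "" then PySem.Set.add seen epId else seen) (unique ++ [ep]) dups

def deduplicate_episodes (episodes : List (List (String × String))) : (List (List (String × String))) × Int :=
  dedupLoopA episodes PySem.Set.empty [] 0

-- ===== PORT B =====
def epIdOf (ep : List (String × String)) : String := (PySem.Dict.mk ep).getD "id" ""

-- first.setdefault(_ep_id(ep), i)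
def firstStep (d : PySem.Dict String Int) (p : Int × List (String × String)) : PySem.Dict String Int :=
  d.setdefault (epIdOf p.2) p.1

def deduplicate_episodes_alt (episodes : List (List (String × String))) : (List (List (String × String))) × Int :=
  let first := (PySem.List.enumerate episodes 0).foldl firstStep PySem.Dict.empty
  -- 'first[_ep_id(ep)] == i' ported as 'first.get? (epIdOf ep) == some i' (the key is always present)
  let unique := ((PySem.List.enumerate episodes 0).filter
      (fun p => epIdOf p.2 == "" || first.get? (epIdOf p.2) == some p.1)).map (·.2)
  (unique, (episodes.length : Int) - (unique.length : Int))

-- ===== PRECONDITION & SPEC =====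
def Spec_deduplicate_episodes (episodes : List (List (String × String))) (out : (List (List (String × String))) × Int) : Prop := out = deduplicate_episodes_alt episodes
instance (episodes : List (List (String × String))) (out : (List (List (String × String))) × Int) : Decidable (Spec_deduplicate_episodes episodes out) := by unfold Spec_deduplicate_episodes; infer_instance

-- ===== CLAIM (what is proved, stated in full; the proofs are below) =====
def Claim_equal_deduplicate_episodes : Prop := ∀ (episodes : List (List (String × String))), Dom_deduplicate_episodes episodes → Spec_deduplicate_episodes episodes (deduplicate_episodes episodes)

-- ===== LEMMAS AND PROOFS =====

-- the list of kept episodes, as a function of the seen-id set alone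
def uniqSpec : List (List (String × String)) → PySem.Set String → List (List (String × String))
  | [], _ => []
  | ep :: rest, seen =>
    if epIdOf ep ≠ "" ∧ PySem.Set.contains seen (epIdOf ep) = true then uniqSpec rest seen
    else ep :: uniqSpec rest (if epIdOf ep ≠ "" then PySem.Set.add seen (epIdOf ep) else seen)

-- A's loop returns the kept list and (processed − kept) added to the counter
theorem dedupLoopA_eq (eps : List (List (String × String))) :
    ∀ (seen : PySem.Set String) (unique : List (List (String × String))) (dups : Int),
    dedupLoopA eps seen unique dups =
      (unique ++ uniqSpec eps seen,
       dups + (eps.length : Int) - ((uniqSpec eps seen).length : Int)) := by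
  induction eps with
  | nil => intro seen unique dups; simp [dedupLoopA, uniqSpec]
  | cons ep rest ih =>
    intro seen unique dups
    by_cases h : epIdOf ep ≠ "" ∧ PySem.Set.contains seen (epIdOf ep) = true
    · simp only [dedupLoopA, uniqSpec, epIdOf] at *
      rw [if_pos h, if_pos h, ih]
      simp only [Prod.mk.injEq, List.length_cons]
      refine ⟨by simp, ?_⟩
      push_cast; ring
    · simp only [dedupLoopA, uniqSpec, epIdOf] at *
      rw [if_neg h, if_neg h, ih]
      simp only [Prod.mk.injEq, List.length_cons]
      refine ⟨by simp, ?_⟩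
      push_cast; ring

-- a setdefault-fold never changes a key that is already present
theorem foldl_firstStep_get?_of_contains (l : List (Int × List (String × String))) :
    ∀ (d : PySem.Dict String Int) (k : String), d.contains k = true →
    (l.foldl firstStep d).get? k = d.get? k := by
  induction l with
  | nil => intro d k _; rfl
  | cons p rest ih =>
    intro d k hk
    simp only [List.foldl_cons]
    by_cases hc : d.contains (epIdOf p.2) = true
    · rw [show firstStep d p = d from by simp [firstStep, PySem.Dict.setdefault_of_contains d _ hc]]
      exact ih d k hk
    · have hne : k ≠ epIdOf p.2 := by intro h; rw [h] at hk; exact hc hk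
      have hstep : firstStep d p = d.insert (epIdOf p.2) p.1 := by
        simp [firstStep, PySem.Dict.setdefault_of_not_contains d _ (by simpa using hc)]
      rw [hstep, ih _ k (by simp [PySem.Dict.contains_insert, hk]),
        PySem.Dict.get?_insert_of_ne d _ hne]

-- core: the indexed filter against the first-occurrence dict equals the streaming kept list
theorem uniqSpec_eq_filter (eps : List (List (String × String))) :
    ∀ (i0 : Int) (seen : PySem.Set String) (d : PySem.Dict String Int),
    (∀ k, k ≠ "" → PySem.Set.contains seen k = d.contains k) →
    (∀ k j, d.get? k = some j → j < i0) →
    uniqSpec eps seen =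
      (((PySem.List.enumerate eps i0).filter
        (fun p => epIdOf p.2 == "" ||
          ((PySem.List.enumerate eps i0).foldl firstStep d).get? (epIdOf p.2) == some p.1)).map (·.2)) := by
  induction eps with
  | nil => intro i0 seen d _ _; simp [uniqSpec, PySem.List.enumerate_nil]
  | cons ep rest ih =>
    intro i0 seen d hinv hbnd
    rw [PySem.List.enumerate_cons]
    simp only [List.foldl_cons, List.filter_cons]
    by_cases hid : epIdOf ep = ""
    · -- empty id: always kept; setdefault touches only key ""
      have hcond : ((epIdOf (i0, ep).2 == "" ||
          (((PySem.List.enumerate rest (i0+1)).foldl firstStep (firstStep d (i0, ep))).get? (epIdOf (i0, ep).2) == some (i0, ep).1))) = true := by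
        simp [hid]
      rw [if_pos hcond]
      have hrec := ih (i0+1) seen (firstStep d (i0, ep))
        (by
          intro k hk
          rw [hinv k hk]
          by_cases hc : d.contains (epIdOf ep) = true
          · rw [show firstStep d (i0, ep) = d from by simp [firstStep, PySem.Dict.setdefault_of_contains d _ hc]]
          · rw [show firstStep d (i0, ep) = d.insert (epIdOf ep) i0 from by
              simp [firstStep, PySem.Dict.setdefault_of_not_contains d _ (by simpa using hc)]]
            rw [PySem.Dict.contains_insert]
            simp [hid, hk])
        (by
          intro k j hj
          by_cases hc : d.contains (epIdOf ep) = true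
          · rw [show firstStep d (i0, ep) = d from by simp [firstStep, PySem.Dict.setdefault_of_contains d _ hc]] at hj
            have := hbnd k j hj; omega
          · rw [show firstStep d (i0, ep) = d.insert (epIdOf ep) i0 from by
              simp [firstStep, PySem.Dict.setdefault_of_not_contains d _ (by simpa using hc)]] at hj
            by_cases hke : k = epIdOf ep
            · subst hke; rw [PySem.Dict.get?_insert_self] at hj
              have : j = i0 := by simpa using hj.symm
              omega
            · rw [PySem.Dict.get?_insert_of_ne d _ hke] at hj
              have := hbnd k j hj; omega)
      simp only [uniqSpec]
      rw [if_neg (fun hand => hand.1 hid), if_neg (fun hne => hne hid)]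
      simp only [List.map_cons]
      exact congrArg _ hrec
    · by_cases hseen : PySem.Set.contains seen (epIdOf ep) = true
      · -- duplicate non-empty id: A skips; in B the dict points to an earlier index
        have hdc : d.contains (epIdOf ep) = true := by rw [← hinv _ hid]; exact hseen
        have hstep : firstStep d (i0, ep) = d := by
          simp [firstStep, PySem.Dict.setdefault_of_contains d _ hdc]
        have hget : (((PySem.List.enumerate rest (i0+1)).foldl firstStep (firstStep d (i0, ep))).get? (epIdOf ep)) = d.get? (epIdOf ep) := by
          rw [hstep]; exact foldl_firstStep_get?_of_contains _ d _ hdc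
        have hsome : ∃ j, d.get? (epIdOf ep) = some j := by
          rcases hj : d.get? (epIdOf ep) with _ | j
          · exfalso
            have := PySem.Dict.contains_eq_isSome_get? (d := d) (k := epIdOf ep)
            rw [hj] at this; simp [this] at hdc
          · exact ⟨j, rfl⟩
        rcases hsome with ⟨j, hj⟩
        have hlt := hbnd _ _ hj
        have hcond : ((epIdOf (i0, ep).2 == "" ||
            (((PySem.List.enumerate rest (i0+1)).foldl firstStep (firstStep d (i0, ep))).get? (epIdOf (i0, ep).2) == some (i0, ep).1))) = false := by
          simp only []
          rw [hget, hj]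
          simp [hid]
          omega
        rw [if_neg (by simp [hcond])]
        simp only [uniqSpec]
        rw [if_pos ⟨hid, hseen⟩, hstep]
        exact ih (i0+1) seen d (fun k hk => hinv k hk) (fun k j hj => by have := hbnd k j hj; omega)
      · -- first occurrence of a non-empty id: both keep it
        have hdc : d.contains (epIdOf ep) = false := by
          rw [← hinv _ hid]; exact Bool.eq_false_iff.mpr hseen
        have hstep : firstStep d (i0, ep) = d.insert (epIdOf ep) i0 := by
          simp [firstStep, PySem.Dict.setdefault_of_not_contains d _ hdc]
        have hget : (((PySem.List.enumerate rest (i0+1)).foldl firstStep (firstStep d (i0, ep))).get? (epIdOf ep)) = some i0 := by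
          rw [hstep, foldl_firstStep_get?_of_contains _ _ _ (by simp [PySem.Dict.contains_insert_self]),
            PySem.Dict.get?_insert_self]
        have hcond : ((epIdOf (i0, ep).2 == "" ||
            (((PySem.List.enumerate rest (i0+1)).foldl firstStep (firstStep d (i0, ep))).get? (epIdOf (i0, ep).2) == some (i0, ep).1))) = true := by
          simp only []
          rw [hget]
          simp
        rw [if_pos hcond]
        simp only [uniqSpec]
        rw [if_neg (fun hand => hseen hand.2), if_pos hid, hstep]
        simp only [List.map_cons]
        refine congrArg _ ?_
        refine ih (i0+1) (PySem.Set.add seen (epIdOf ep)) (d.insert (epIdOf ep) i0) ?_ ?_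
        · intro k hk
          rw [PySem.Dict.contains_insert]
          by_cases hke : k = epIdOf ep
          · subst hke
            simp [PySem.Set.mem_add]
          · rw [show (k == epIdOf ep) = false from by simp [hke], Bool.false_or, ← hinv k hk]
            simp [PySem.Set.mem_add, hke]
        · intro k j hj
          by_cases hke : k = epIdOf ep
          · subst hke; rw [PySem.Dict.get?_insert_self] at hj
            have : j = i0 := by simpa using hj.symm
            omega
          · rw [PySem.Dict.get?_insert_of_ne d _ hke] at hj
            have := hbnd k j hj; omega

-- ===== VERDICT (by name: the statement is the Claim_ definition above) =====
theorem deduplicate_episodes_spec : Claim_equal_deduplicate_episodes := by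
  intro eps _
  unfold Spec_deduplicate_episodes deduplicate_episodes deduplicate_episodes_alt
  rw [dedupLoopA_eq]
  have hu := uniqSpec_eq_filter eps 0 PySem.Set.empty PySem.Dict.empty
    (by intro k _; simp [PySem.Set.empty, PySem.Dict.contains_empty]) 
    (by intro k j hj; simp [PySem.Dict.get?_empty] at hj)
  simp only [List.nil_append]
  rw [hu]
  refine Prod.ext rfl ?_
  simp only []
  rw [← hu]
  ring
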